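-- pv_equiv track=rewrite | github.com/arnabs542/oj | leetcode/325.maximumSizeSubarraySumEqualsK.py | _maxSubArrayLenPrefixSum
-- ===== SOURCE A (Python) =====
-- def _maxSubArrayLenPrefixSum(nums, k):
--     n = len(nums)
--     # ps = [0 for _ in range(n + 1)]
--     ps = 0
--
--     maxLength = 0
--     invertedIndex = {0:0}
--     for i in range(1, n + 1):
--         ps = ps + nums[i - 1]
--         s = ps - k
--         if s in invertedIndex:
--             maxLength = max(maxLength, i - invertedIndex[s])
--         if ps not in invertedIndex:
--             invertedIndex[ps] = i
--     return maxLength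
-- ===== SOURCE B (Python) =====
-- def _maxSubArrayLenPrefixSum(nums, k):
--     best = 0
--     rest = nums
--     while rest:
--         s = 0
--         length = 0
--         for x in rest:
--             s += x
--             length += 1
--             if s == k and length > best:
--                 best = length
--         rest = rest[1:]
--     return best
-- ===== Notes on version B (the rewrite author's own statement) =====
-- stated objective: simpler
-- what changed: Replaced the single-pass prefix-sum first-occurrence hash map with a plain brute-force scan of every start position, accumulating a running sum over each suffix and keeping the best matching length; no prefix sums and no dictionary at all.
import Mathlib
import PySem

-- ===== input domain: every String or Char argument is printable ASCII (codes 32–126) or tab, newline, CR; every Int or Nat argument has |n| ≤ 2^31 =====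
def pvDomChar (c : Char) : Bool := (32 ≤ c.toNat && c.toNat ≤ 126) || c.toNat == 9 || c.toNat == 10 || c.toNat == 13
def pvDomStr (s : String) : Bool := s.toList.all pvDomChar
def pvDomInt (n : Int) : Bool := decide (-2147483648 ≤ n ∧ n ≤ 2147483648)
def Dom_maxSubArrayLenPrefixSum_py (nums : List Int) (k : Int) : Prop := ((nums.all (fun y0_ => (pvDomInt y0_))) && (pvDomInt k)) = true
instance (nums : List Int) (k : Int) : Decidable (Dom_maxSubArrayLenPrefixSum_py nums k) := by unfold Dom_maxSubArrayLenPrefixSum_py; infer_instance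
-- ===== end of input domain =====

-- B replaces A's single-pass prefix-sum/first-occurrence hash map with a plain brute-force
-- scan of every start position (running sum over each suffix) — simpler, no dictionary.

-- ===== PORT A =====
-- one loop step: ps += nums[i-1]; s = ps - k; maybe improve maxLength; maybe record ps
def stepA (nums : List Int) (k : Int) (st : Int × Int × PySem.Dict Int Int) (i : Int) :
    Int × Int × PySem.Dict Int Int :=
  let ps := st.1 + PySem.List.pyGetD nums (i - 1) 0   -- index i-1 is always in range in this loop
  let s := ps - k
  let m := match st.2.2.get? s with
    | some j => max st.2.1 (i - j)
    | none => st.2.1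
  let d := if st.2.2.contains ps then st.2.2 else st.2.2.insert ps i
  (ps, m, d)

def maxSubArrayLenPrefixSum_py (nums : List Int) (k : Int) : Int :=
  ((PySem.List.pyRange 1 ((nums.length : Int) + 1) 1).foldl (stepA nums k)
    (0, 0, PySem.Dict.ofList [((0 : Int), (0 : Int))])).2.1

-- ===== PORT B =====
-- inner 'for x in rest' loop: running sum, running length, best so far
def innerB (k : Int) : List Int → Int → Int → Int → Int
  | [], _, _, best => best
  | x :: xs, s, len, best =>
    innerB k xs (s + x) (len + 1)
      (if s + x = k ∧ best < len + 1 then len + 1 else best)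

-- outer 'while rest' loop: scan the current suffix, then drop its head
def outerB (k : Int) : List Int → Int → Int
  | [], best => best
  | x :: xs, best => outerB k xs (innerB k (x :: xs) 0 0 best)

def maxSubArrayLenPrefixSum_py_alt (nums : List Int) (k : Int) : Int :=
  outerB k nums 0

-- ===== PRECONDITION & SPEC =====
def Spec_maxSubArrayLenPrefixSum_py (nums : List Int) (k : Int) (out : Int) : Prop := out = maxSubArrayLenPrefixSum_py_alt nums k
instance (nums : List Int) (k : Int) (out : Int) : Decidable (Spec_maxSubArrayLenPrefixSum_py nums k out) := by unfold Spec_maxSubArrayLenPrefixSum_py; infer_instance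

-- ===== CLAIM (what is proved, stated in full; the proofs are below) =====
def Claim_equal_maxSubArrayLenPrefixSum_py : Prop := ∀ (nums : List Int) (k : Int), Dom_maxSubArrayLenPrefixSum_py nums k → Spec_maxSubArrayLenPrefixSum_py nums k (maxSubArrayLenPrefixSum_py nums k)

-- ===== LEMMAS AND PROOFS =====

def pref (nums : List Int) (a : Nat) : Int := (nums.take a).sum

def IsBest (nums : List Int) (k v : Int) : Prop :=
  0 ≤ v ∧
  (v = 0 ∨ ∃ a b : Nat, a < b ∧ b ≤ nums.length ∧ pref nums b - pref nums a = k ∧ v = (b : Int) - (a : Int)) ∧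
  (∀ a b : Nat, a < b → b ≤ nums.length → pref nums b - pref nums a = k → (b : Int) - (a : Int) ≤ v)

theorem IsBest_unique {nums : List Int} {k v w : Int}
    (hv : IsBest nums k v) (hw : IsBest nums k w) : v = w := by
  obtain ⟨hv0, hvE, hvU⟩ := hv
  obtain ⟨hw0, hwE, hwU⟩ := hw
  have h1 : v ≤ w := by
    rcases hvE with h | ⟨a, b, hab, hbn, hs, he⟩
    · omega
    · have := hwU a b hab hbn hs; omega
  have h2 : w ≤ v := by
    rcases hwE with h | ⟨a, b, hab, hbn, hs, he⟩
    · omega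
    · have := hvU a b hab hbn hs; omega
  omega

theorem pref_drop_take (nums : List Int) (a t : Nat) :
    ((nums.drop a).take t).sum = pref nums (a + t) - pref nums a := by
  have h := List.take_add (l := nums) (i := a) (j := t)
  simp [pref, h]

theorem innerB_spec (k : Int) (xs : List Int) :
    ∀ (s len best : Int),
      best ≤ innerB k xs s len best ∧
      (innerB k xs s len best = best ∨
        ∃ t : Nat, 1 ≤ t ∧ t ≤ xs.length ∧ s + (xs.take t).sum = k ∧
          innerB k xs s len best = len + (t : Int)) ∧
      (∀ t : Nat, 1 ≤ t → t ≤ xs.length → s + (xs.take t).sum = k →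
        len + (t : Int) ≤ innerB k xs s len best) := by
  induction xs with
  | nil =>
    intro s len best
    refine ⟨le_refl _, Or.inl rfl, ?_⟩
    intro t h1 h2
    simp at h2; omega
  | cons x xs ih =>
    intro s len best
    set best' := if s + x = k ∧ best < len + 1 then len + 1 else best with hb'
    obtain ⟨ihle, ihE, ihU⟩ := ih (s + x) (len + 1) best'
    have hbb' : best ≤ best' := by rw [hb']; split <;> omega
    have hr : innerB k (x :: xs) s len best = innerB k xs (s + x) (len + 1) best' := by
      simp [innerB, hb']
    refine ⟨by omega, ?_, ?_⟩
    · rw [hr]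
      rcases ihE with h | ⟨t, ht1, ht2, hts, hte⟩
      · rw [hb'] at h
        by_cases hc : s + x = k ∧ best < len + 1
        · right
          refine ⟨1, le_refl _, by simp, by simpa using hc.1, ?_⟩
          rw [h, if_pos hc]; push_cast; ring
        · left; rw [h, if_neg hc]
      · right
        refine ⟨t + 1, by omega, by simp; omega, ?_, ?_⟩
        · simp [List.take_succ_cons]; omega
        · rw [hte]; push_cast; ring
    · intro t ht1 ht2 hts
      rw [hr]
      match t, ht1 with
      | 1, _ =>
        have hsx : s + x = k := by simpa using hts
        have : len + 1 ≤ best' := by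
          rw [hb']; split
          · omega
          · rename_i hc
            push Not at hc
            have := hc hsx; omega
        omega
      | (t' + 1 + 1), _ =>
        have hts' : (s + x) + (xs.take (t' + 1)).sum = k := by
          simp [List.take_succ_cons] at hts ⊢; omega
        have := ihU (t' + 1) (by omega) (by simp at ht2; omega) hts'
        push_cast at this ⊢
        omega

theorem outerB_spec (k : Int) (xs : List Int) :
    ∀ (best : Int),
      best ≤ outerB k xs best ∧
      (outerB k xs best = best ∨
        ∃ a t : Nat, a + t ≤ xs.length ∧ 1 ≤ t ∧ ((xs.drop a).take t).sum = k ∧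
          outerB k xs best = (t : Int)) ∧
      (∀ a t : Nat, a + t ≤ xs.length → 1 ≤ t → ((xs.drop a).take t).sum = k →
        (t : Int) ≤ outerB k xs best) := by
  induction xs with
  | nil =>
    intro best
    refine ⟨le_refl _, Or.inl rfl, ?_⟩
    intro a t h1 h2
    simp at h1; omega
  | cons x xs ih =>
    intro best
    obtain ⟨ile, iE, iU⟩ := innerB_spec k (x :: xs) 0 0 best
    set b1 := innerB k (x :: xs) 0 0 best with hb1
    obtain ⟨ole, oE, oU⟩ := ih b1
    have hr : outerB k (x :: xs) best = outerB k xs b1 := by simp [outerB, hb1]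
    refine ⟨by omega, ?_, ?_⟩
    · rw [hr]
      rcases oE with h | ⟨a, t, h1, h2, h3, h4⟩
      · rw [h]
        rcases iE with h' | ⟨t, ht1, ht2, hts, hte⟩
        · left; exact h'
        · right
          exact ⟨0, t, by simpa using ht2, ht1, by simpa using hts, by rw [hte]; omega⟩
      · right
        exact ⟨a + 1, t, by simp; omega, h2, by simpa using h3, h4⟩
    · intro a t h1 h2 h3
      rw [hr]
      match a with
      | 0 =>
        have := iU t h2 (by simpa using h1) (by simpa using h3)
        omega
      | a' + 1 =>
        exact oU a' t (by simp at h1; omega) h2 (by simpa using h3)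

theorem alt_isBest (nums : List Int) (k : Int) :
    IsBest nums k (maxSubArrayLenPrefixSum_py_alt nums k) := by
  unfold maxSubArrayLenPrefixSum_py_alt
  obtain ⟨ole, oE, oU⟩ := outerB_spec k nums 0
  refine ⟨ole, ?_, ?_⟩
  · rcases oE with h | ⟨a, t, h1, h2, h3, h4⟩
    · left; exact h
    · right
      refine ⟨a, a + t, by omega, h1, ?_, by rw [h4]; push_cast; ring⟩
      rw [← pref_drop_take, h3]
  · intro a b hab hbn hs
    have h3 : ((nums.drop a).take (b - a)).sum = k := by
      rw [pref_drop_take]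
      have : a + (b - a) = b := by omega
      rw [this, hs]
    have := oU a (b - a) (by omega) (by omega) h3
    push_cast [Nat.cast_sub (le_of_lt hab)] at this ⊢
    omega

def firstOcc (nums : List Int) (i : Nat) (v : Int) : Option Int :=
  ((List.range (i + 1)).find? (fun j => pref nums j == v)).map (fun j => (j : Int))

theorem firstOcc_some {nums : List Int} {i : Nat} {v j : Int}
    (h : firstOcc nums i v = some j) :
    ∃ j0 : Nat, j = (j0 : Int) ∧ j0 ≤ i ∧ pref nums j0 = v ∧
      ∀ a : Nat, a < j0 → pref nums a ≠ v := by
  unfold firstOcc at h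
  rcases hf : (List.range (i + 1)).find? (fun j => pref nums j == v) with _ | j0
  · rw [hf] at h; simp at h
  · rw [hf] at h
    simp at h
    rw [List.find?_eq_some_iff_append] at hf
    obtain ⟨hp, as, bs, hsplit, hall⟩ := hf
    have hlen : as.length + (bs.length + 1) = i + 1 := by
      have := congrArg List.length hsplit
      simp at this; omega
    have hj0 : j0 = as.length := by
      have hg : (List.range (i + 1))[as.length]? = some j0 := by
        rw [hsplit, List.getElem?_append_right (le_refl _)]
        simp
      rw [List.getElem?_range (by omega)] at hg
      exact (Option.some_inj.mp hg).symm
    refine ⟨j0, h.symm, by omega, by simpa using hp, ?_⟩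
    intro a ha hav
    have hmem : a ∈ as := by
      have hga : as[a]? = some a := by
        have hr : (List.range (i + 1))[a]? = some a := List.getElem?_range (by omega)
        rw [hsplit, List.getElem?_append_left (by omega)] at hr
        exact hr
      exact List.mem_of_getElem? hga
    have := hall a hmem
    simp [hav] at this

theorem firstOcc_none {nums : List Int} {i : Nat} {v : Int}
    (h : firstOcc nums i v = none) : ∀ a : Nat, a ≤ i → pref nums a ≠ v := by
  intro a ha hav
  rcases hf : (List.range (i + 1)).find? (fun j => pref nums j == v) with _ | j0
  · rw [List.find?_eq_none] at hf
    have := hf a (by simp; omega)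
    simp [hav] at this
  · unfold firstOcc at h; rw [hf] at h; simp at h

theorem firstOcc_succ (nums : List Int) (i : Nat) (v : Int) :
    firstOcc nums (i + 1) v =
      (firstOcc nums i v).or
        (if pref nums (i + 1) = v then some ((i + 1 : Nat) : Int) else none) := by
  unfold firstOcc
  rw [List.range_succ, List.find?_append]
  rcases hf : (List.range (i + 1)).find? (fun j => pref nums j == v) with _ | j0
  · by_cases hv : pref nums (i + 1) = v
    · have hb : (pref nums (i + 1) == v) = true := by simpa using hv
      simp [List.find?, hv, Option.or]
    · have hb : (pref nums (i + 1) == v) = false := by simpa using hv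
      simp [List.find?, hb, hv, Option.or]
  · simp [Option.or]

theorem pref_succ (nums : List Int) (i : Nat) (hi : i < nums.length) :
    pref nums (i + 1) = pref nums i + nums.getD i 0 := by
  have h := List.sum_take_succ nums i hi
  simp [pref, h, List.getD, List.getElem?_eq_getElem hi]

def BestUpTo (nums : List Int) (k : Int) (i : Nat) (m : Int) : Prop :=
  0 ≤ m ∧
  (m = 0 ∨ ∃ a b : Nat, a < b ∧ b ≤ i ∧ pref nums b - pref nums a = k ∧ m = (b : Int) - (a : Int)) ∧
  (∀ a b : Nat, a < b → b ≤ i → pref nums b - pref nums a = k → (b : Int) - (a : Int) ≤ m)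

def InvA (nums : List Int) (k : Int) (i : Nat) (st : Int × Int × PySem.Dict Int Int) : Prop :=
  st.1 = pref nums i ∧
  (∀ v : Int, st.2.2.get? v = firstOcc nums i v) ∧
  BestUpTo nums k i st.2.1

theorem stepA_inv (nums : List Int) (k : Int) (i : Nat) (ps0 m0 : Int)
    (d0 : PySem.Dict Int Int) (hi : i < nums.length) (h : InvA nums k i (ps0, m0, d0)) :
    InvA nums k (i + 1) (stepA nums k (ps0, m0, d0) ((i : Int) + 1)) := by
  obtain ⟨h1, h2, hb0, hbE, hbU⟩ := h
  simp only at h1 h2 hb0 hbE hbU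
  have hidx : PySem.List.pyGetD nums ((i : Int) + 1 - 1) 0 = nums.getD i 0 := by
    have : ((i : Int) + 1 - 1) = (i : Int) := by ring
    rw [this, PySem.List.pyGetD_natCast]
  have hps : ps0 + PySem.List.pyGetD nums ((i : Int) + 1 - 1) 0 = pref nums (i + 1) := by
    rw [hidx, h1, pref_succ nums i hi]
  have hstep : stepA nums k (ps0, m0, d0) ((i : Int) + 1) =
      (pref nums (i + 1),
       (match d0.get? (pref nums (i + 1) - k) with
        | some j => max m0 ((i : Int) + 1 - j)
        | none => m0),
       if d0.contains (pref nums (i + 1)) then d0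
       else d0.insert (pref nums (i + 1)) ((i : Int) + 1)) := by
    simp only [stepA, hps]
  rw [hstep]
  refine ⟨rfl, ?_, ?_⟩
  · -- dict invariant
    intro v
    have hcont : d0.contains (pref nums (i + 1)) = (firstOcc nums i (pref nums (i + 1))).isSome := by
      rw [PySem.Dict.contains_eq_isSome_get?, h2]
    simp only
    rcases hc : firstOcc nums i (pref nums (i + 1)) with _ | j
    · -- not present: insert
      rw [hcont, hc]
      simp only [Option.isSome_none, Bool.false_eq_true, if_false]
      rw [PySem.Dict.get?_insert, firstOcc_succ, h2]
      by_cases hv : v = pref nums (i + 1)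
      · rw [if_pos hv, hv, hc]
        simp [Option.or]
      · rw [if_neg hv]
        rcases hfv : firstOcc nums i v with _ | w
        · have : ¬ (pref nums (i + 1) = v) := fun he => hv he.symm
          simp [Option.or, this]
        · simp [Option.or]
    · -- present: dict unchanged
      rw [hcont, hc]
      simp only [Option.isSome_some, if_true]
      rw [firstOcc_succ, h2]
      rcases hfv : firstOcc nums i v with _ | w
      · have hne : ¬ (pref nums (i + 1) = v) := by
          intro he
          rw [he] at hc
          rw [hfv] at hc
          simp at hc
        simp [Option.or, hne]
      · simp [Option.or]
  · -- best invariant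
    simp only
    rcases hd : d0.get? (pref nums (i + 1) - k) with _ | j
    · -- no earlier prefix equals ps - k
      rw [h2] at hd
      have hnone := firstOcc_none hd
      refine ⟨hb0, ?_, ?_⟩
      · rcases hbE with h | ⟨a, b, hab, hbn, hs, he⟩
        · exact Or.inl h
        · exact Or.inr ⟨a, b, hab, by omega, hs, he⟩
      · intro a b hab hbn hs
        rcases Nat.lt_or_ge b (i + 1) with hbi | hbi
        · exact hbU a b hab (by omega) hs
        · have hbeq : b = i + 1 := by omega
          subst hbeq
          exact absurd (by omega : pref nums a = pref nums (i + 1) - k)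
            (hnone a (by omega))
    · -- first occurrence j of ps - k
      dsimp only
      rw [h2] at hd
      obtain ⟨j0, hj, hji, hjp, hjmin⟩ := firstOcc_some hd
      subst hj
      refine ⟨le_max_of_le_left hb0, ?_, ?_⟩
      · rcases le_or_gt ((i : Int) + 1 - (j0 : Int)) m0 with hm | hm
        · rw [max_eq_left hm]
          rcases hbE with h | ⟨a, b, hab, hbn, hs, he⟩
          · exact Or.inl h
          · exact Or.inr ⟨a, b, hab, by omega, hs, he⟩
        · rw [max_eq_right (le_of_lt hm)]
          refine Or.inr ⟨j0, i + 1, by omega, le_refl _, by omega, by push_cast; ring⟩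
      · intro a b hab hbn hs
        rcases Nat.lt_or_ge b (i + 1) with hbi | hbi
        · exact le_trans (hbU a b hab (by omega) hs) (le_max_left _ _)
        · have hbeq : b = i + 1 := by omega
          subst hbeq
          have hpa : pref nums a = pref nums (i + 1) - k := by omega
          have hja : j0 ≤ a := by
            by_contra hlt
            exact hjmin a (by omega) hpa
          have hle : ((i + 1 : Nat) : Int) - (a : Int) ≤ (i : Int) + 1 - (j0 : Int) := by
            push_cast; omega
          exact le_trans hle (le_max_right _ _)

theorem foldA_inv (nums : List Int) (k : Int) :
    ∀ i : Nat, i ≤ nums.length →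
      InvA nums k i ((PySem.List.pyRange 1 ((i : Int) + 1) 1).foldl (stepA nums k)
        (0, 0, PySem.Dict.ofList [((0 : Int), (0 : Int))])) := by
  intro i
  induction i with
  | zero =>
    intro _
    rw [show ((0 : Nat) : Int) + 1 = 1 by norm_num,
      PySem.List.pyRange_one_eq_nil (le_refl 1), List.foldl_nil]
    refine ⟨by simp [pref], ?_, le_refl 0, Or.inl rfl, ?_⟩
    · intro v
      rw [show PySem.Dict.ofList [((0 : Int), (0 : Int))] = PySem.Dict.empty.insert 0 0 from rfl,
        PySem.Dict.get?_insert]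
      by_cases hv : v = 0
      · subst hv
        simp [firstOcc, List.range_one, pref]
      · rw [if_neg hv, PySem.Dict.get?_empty]
        have hb : (pref nums 0 == v) = false := by
          simp [pref]
          exact fun he => hv he.symm
        simp [firstOcc, List.range_one, List.find?, hb]
    · intro a b hab hbn
      omega
  | succ i ih =>
    intro hle
    have hInv := ih (by omega)
    rcases hst : (PySem.List.pyRange 1 ((i : Int) + 1) 1).foldl (stepA nums k)
        (0, 0, PySem.Dict.ofList [((0 : Int), (0 : Int))]) with ⟨ps0, m0, d0⟩
    rw [hst] at hInv
    have hstep := stepA_inv nums k i ps0 m0 d0 (by omega) hInv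
    rw [show (((i + 1 : Nat)) : Int) + 1 = ((i : Int) + 1) + 1 by push_cast; ring,
      PySem.List.pyRange_one_succ_right (by omega), List.foldl_append, hst,
      List.foldl_cons, List.foldl_nil]
    exact hstep

theorem a_isBest (nums : List Int) (k : Int) :
    IsBest nums k (maxSubArrayLenPrefixSum_py nums k) := by
  have h := foldA_inv nums k nums.length (le_refl _)
  exact h.2.2

-- ===== VERDICT (by name: the statement is the Claim_ definition above) =====
theorem maxSubArrayLenPrefixSum_py_spec : Claim_equal_maxSubArrayLenPrefixSum_py := by
  intro nums k _
  exact IsBest_unique (a_isBest nums k) (alt_isBest nums k)
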